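-- pv_equiv track=rewrite | github.com/stravoris-tech/collatz-hidden-order | scripts/route_skeleton.py | accelerated_predecessor_chain_from_code
-- ===== SOURCE A (Python) =====
-- from typing import List, Dict, Set, Callable, Optional
--
-- def accelerated_predecessor_chain_from_code(code: str) -> List[int]:
--     """
--     Build the accelerated predecessor chain [1,...,n] from ω(n) by:
--       - suppress values produced by A or C steps immediately followed by K,
--       - collapse each maximal K^r into a single step (record only the final lifted value).
--     """
--     m = 1
--     chain = [m]
--     i = 0
--     L = len(code)
--
--     while i < L:
--         ch = code[i]
--
--         if ch == "A":
--             m = (4 * m - 1) // 3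
--             if i + 1 >= L or code[i + 1] != "K":
--                 chain.append(m)
--             i += 1
--             continue
--
--         if ch == "C":
--             m = (2 * m - 1) // 3
--             if i + 1 >= L or code[i + 1] != "K":
--                 chain.append(m)
--             i += 1
--             continue
--
--         if ch == "K":
--             while i < L and code[i] == "K":
--                 m = 4 * m + 1
--                 i += 1
--             chain.append(m)
--             continue
--
--         raise ValueError(f"Invalid symbol '{ch}' in ω(n)")
--
--     return chain
-- ===== SOURCE B (Python) =====
-- from typing import List
-- from itertools import groupby
--
-- def accelerated_predecessor_chain_from_code(code: str) -> List[int]: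
--     # Run-based algorithm: run-length encode the code, collapse each maximal
--     # K^r run in ONE step via the closed form m -> 4**r * m + (4**r - 1)//3
--     # (iterating m -> 4m+1 r times), and for an A/C run emit every value but
--     # drop the last one when the next run is a K-run (the suppression rule).
--     runs = [(ch, sum(1 for _ in g)) for ch, g in groupby(code)]
--     for ch, _ in runs:
--         if ch not in ("A", "C", "K"):
--             raise ValueError(f"Invalid symbol '{ch}' in ω(n)")
--     m = 1
--     chain = [m]
--     for j, (ch, r) in enumerate(runs):
--         if ch == "K":
--             p = 4 ** r
--             m = p * m + (p - 1) // 3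
--             chain.append(m)
--         else:
--             vals = []
--             for _ in range(r):
--                 m = (4 * m - 1) // 3 if ch == "A" else (2 * m - 1) // 3
--                 vals.append(m)
--             if j + 1 < len(runs) and runs[j + 1][0] == "K":
--                 vals.pop()
--             chain.extend(vals)
--     return chain
-- ===== Notes on version B (the rewrite author's own statement) =====
-- stated objective: alternative
-- what changed: B first run-length encodes the code (itertools.groupby) and then works run by run: each maximal K-run is collapsed in one step by the closed form m -> 4**r*m + (4**r-1)//3 instead of A's inner while-loop, and an A/C run emits its values with the last dropped when the next run is a K-run, replacing A's per-character lookahead.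
import Mathlib
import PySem

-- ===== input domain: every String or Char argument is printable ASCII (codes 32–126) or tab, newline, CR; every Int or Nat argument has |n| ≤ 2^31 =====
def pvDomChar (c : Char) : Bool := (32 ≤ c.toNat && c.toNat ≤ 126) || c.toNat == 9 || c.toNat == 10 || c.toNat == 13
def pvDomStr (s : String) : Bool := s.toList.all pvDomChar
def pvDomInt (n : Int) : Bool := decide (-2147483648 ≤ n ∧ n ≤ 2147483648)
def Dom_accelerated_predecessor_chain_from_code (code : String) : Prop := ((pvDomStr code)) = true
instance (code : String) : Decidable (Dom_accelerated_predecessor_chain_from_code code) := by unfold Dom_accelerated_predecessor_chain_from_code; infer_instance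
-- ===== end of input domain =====

-- B works run by run (run-length encoding; K-runs collapsed by a closed form) instead of A's per-character scan; equal on all valid codes.

-- ===== PORT A =====
-- inner 'while i < L and code[i] == "K"' loop: consumes the K-run, returns (final m, remaining chars)
def pvA_kloop : List Char → Int → Int × List Char
  | [], m => (m, [])
  | c :: rest, m => if c = 'K' then pvA_kloop rest (4 * m + 1) else (m, c :: rest)

lemma pvA_kloop_len (cs : List Char) (m : Int) : (pvA_kloop cs m).2.length ≤ cs.length := by
  induction cs generalizing m with
  | nil => simp [pvA_kloop]
  | cons c rest ih =>
    by_cases h : c = 'K' <;> simp [pvA_kloop, h]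
    exact (ih _).trans (Nat.le_succ _)

-- the outer while-loop, step for step; on an invalid symbol Python raises (outside Pre_), we return the chain so far
def pvA_go : List Char → Int → List Int → List Int
  | [], _, chain => chain
  | c :: rest, m, chain =>
    if c = 'A' then
      let m' := PySem.Int.floordiv (4 * m - 1) 3
      pvA_go rest m' (if rest.head? = some 'K' then chain else chain ++ [m'])
    else if c = 'C' then
      let m' := PySem.Int.floordiv (2 * m - 1) 3
      pvA_go rest m' (if rest.head? = some 'K' then chain else chain ++ [m'])
    else if c = 'K' then
      let p := pvA_kloop rest (4 * m + 1)
      pvA_go p.2 p.1 (chain ++ [p.1])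
    else chain
termination_by cs _ _ => cs.length
decreasing_by
  · simp
  · simp
  · exact Nat.lt_succ_of_le (pvA_kloop_len rest (4 * m + 1))

def accelerated_predecessor_chain_from_code (code : String) : List Int :=
  pvA_go code.toList 1 [1]

-- ===== PORT B =====
-- run-length encoding (port of itertools.groupby + run lengths)
def pvRle : List Char → List (Char × Nat)
  | [] => []
  | c :: rest =>
    (c, (rest.takeWhile (· = c)).length + 1) :: pvRle (rest.dropWhile (· = c))
termination_by cs => cs.length
decreasing_by
  exact Nat.lt_succ_of_le (rest.length_dropWhile_le _)

-- the inner 'for _ in range(r)' loop of an A/C run: (final m, list of emitted values)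
def pvB_run (f : Int → Int) : Nat → Int → Int × List Int
  | 0, m => (m, [])
  | n + 1, m =>
    let m' := f m
    let p := pvB_run f n m'
    (p.1, m' :: p.2)

-- the 'for j, (ch, r) in enumerate(runs)' loop (lookahead = head of the remaining runs)
def pvB_go : List (Char × Nat) → Int → List Int
  | [], _ => []
  | (ch, r) :: rest, m =>
    if ch = 'K' then
      let p : Int := 4 ^ r
      let m' := p * m + PySem.Int.floordiv (p - 1) 3
      m' :: pvB_go rest m'
    else
      let q := pvB_run (fun x => if ch = 'A' then PySem.Int.floordiv (4 * x - 1) 3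
                                 else PySem.Int.floordiv (2 * x - 1) 3) r m
      (if (rest.head?.map Prod.fst) = some 'K' then q.2.dropLast else q.2) ++ pvB_go rest q.1

def accelerated_predecessor_chain_from_code_alt (code : String) : List Int :=
  let runs := pvRle code.toList
  if runs.all (fun p => p.1 = 'A' || p.1 = 'C' || p.1 = 'K') then
    1 :: pvB_go runs 1
  else []  -- Python B raises ValueError here (outside Pre_)

-- ===== PRECONDITION & SPEC =====
-- Pre_ excludes exactly the codes containing a symbol other than 'A','C','K', on which both A and B raise ValueError.
def Pre_accelerated_predecessor_chain_from_code (code : String) : Prop :=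
  (code.toList.all fun c => c == 'A' || c == 'C' || c == 'K') = true
instance (code : String) : Decidable (Pre_accelerated_predecessor_chain_from_code code) := by unfold Pre_accelerated_predecessor_chain_from_code; infer_instance
def pvWitness_accelerated_predecessor_chain_from_code : String := "ACKKA"

def Spec_accelerated_predecessor_chain_from_code (code : String) (out : List Int) : Prop := out = accelerated_predecessor_chain_from_code_alt code
instance (code : String) (out : List Int) : Decidable (Spec_accelerated_predecessor_chain_from_code code out) := by unfold Spec_accelerated_predecessor_chain_from_code; infer_instance

-- ===== CLAIM (what is proved, stated in full; the proofs are below) =====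
def Claim_equal_accelerated_predecessor_chain_from_code : Prop := ∀ (code : String), Dom_accelerated_predecessor_chain_from_code code → Pre_accelerated_predecessor_chain_from_code code → Spec_accelerated_predecessor_chain_from_code code (accelerated_predecessor_chain_from_code code)

-- ===== LEMMAS AND PROOFS =====

-- iterating m -> 4m+1
def pvIterK : Nat → Int → Int
  | 0, m => m
  | n + 1, m => 4 * pvIterK n m + 1

lemma pvIterK_succ' (n : Nat) (m : Int) : pvIterK (n + 1) m = pvIterK n (4 * m + 1) := by
  induction n generalizing m with
  | zero => rfl
  | succ k ih => show 4 * pvIterK (k + 1) m + 1 = _; rw [ih]; rfl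

-- closed form: 4^n * m + (4^n - 1)/3 = iterate of m -> 4m+1
lemma pvClosedK (n : Nat) (m : Int) :
    (4 : Int) ^ n * m + PySem.Int.floordiv ((4 : Int) ^ n - 1) 3 = pvIterK n m := by
  have key : ∀ k : Nat, ∃ t : Int, (4 : Int) ^ k - 1 = 3 * t ∧ ∀ m : Int, (4 : Int) ^ k * m + t = pvIterK k m := by
    intro k
    induction k with
    | zero => exact ⟨0, by norm_num, fun m => by simp [pvIterK]⟩
    | succ j ih =>
      obtain ⟨t, ht, hiter⟩ := ih
      refine ⟨4 * t + 1, by rw [pow_succ]; linarith, fun m => ?_⟩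
      show _ = 4 * pvIterK j m + 1
      rw [← hiter m]; ring
  obtain ⟨t, ht, hiter⟩ := key n
  rw [ht, ← hiter m]
  have h3 : PySem.Int.floordiv (3 * t) 3 = t := by
    rw [PySem.Int.floordiv_eq_ediv_of_pos (by norm_num)]
    omega
  rw [h3]

-- A's inner K-loop consumes exactly a K-run and iterates m -> 4m+1
lemma pvA_kloop_run (n : Nat) (rest : List Char) (m : Int) (h : rest.head? ≠ some 'K') :
    pvA_kloop (List.replicate n 'K' ++ rest) m = (pvIterK n m, rest) := by
  induction n generalizing m with
  | zero =>
    cases rest with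
    | nil => simp [pvA_kloop, pvIterK]
    | cons c t =>
      have hcne : c ≠ 'K' := by simpa using h
      simp [pvA_kloop, hcne, pvIterK]
  | succ k ih =>
    simp only [List.replicate_succ, List.cons_append, pvA_kloop, if_pos]
    rw [ih, ← pvIterK_succ']

-- A over a whole K-run (n ≥ 1): one appended value, the iterated m
lemma pvA_go_Krun (n : Nat) (rest : List Char) (m : Int) (chain : List Int)
    (h : rest.head? ≠ some 'K') :
    pvA_go (List.replicate (n + 1) 'K' ++ rest) m chain
      = pvA_go rest (pvIterK (n + 1) m) (chain ++ [pvIterK (n + 1) m]) := by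
  rw [List.replicate_succ, List.cons_append]
  show pvA_go ('K' :: (List.replicate n 'K' ++ rest)) m chain = _
  simp only [pvA_go, if_neg (by decide : ¬ ('K' = 'A')), if_neg (by decide : ¬ ('K' = 'C'))]
  rw [pvA_kloop_run n rest (4 * m + 1) h, ← pvIterK_succ']
  simp

-- A over a whole A/C run: every value appended except (when a K-run follows) the last
lemma pvA_go_ACrun (c : Char) (hA : c = 'A' ∨ c = 'C') (n : Nat) (rest : List Char)
    (m : Int) (chain : List Int) (h : rest.head? ≠ some c) :
    pvA_go (List.replicate (n + 1) c ++ rest) m chain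
      = pvA_go rest (pvB_run (fun x => if c = 'A' then PySem.Int.floordiv (4 * x - 1) 3
                                       else PySem.Int.floordiv (2 * x - 1) 3) (n + 1) m).1
          (chain ++ (if rest.head? = some 'K' then
              ((pvB_run (fun x => if c = 'A' then PySem.Int.floordiv (4 * x - 1) 3
                                  else PySem.Int.floordiv (2 * x - 1) 3) (n + 1) m).2).dropLast
            else (pvB_run (fun x => if c = 'A' then PySem.Int.floordiv (4 * x - 1) 3
                                  else PySem.Int.floordiv (2 * x - 1) 3) (n + 1) m).2)) := by
  induction n generalizing m chain with
  | zero =>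
    rcases hA with h1 | h1 <;> subst h1 <;>
    · simp only [List.replicate_succ, List.replicate_zero, List.nil_append, List.cons_append,
        pvA_go, pvB_run]
      split_ifs with hk <;> simp_all
  | succ k ih =>
    have hhead : (List.replicate (k + 1) c ++ rest).head? = some c := by
      simp [List.replicate_succ]
    have hne : ∀ f : Int → Int, ∀ x : Int, (pvB_run f (k + 1) x).2 ≠ [] := by
      intro f x; simp [pvB_run]
    rcases hA with h1 | h1
    · -- c = 'A'
      subst h1
      set f : Int → Int := fun x => if 'A' = 'A' then PySem.Int.floordiv (4 * x - 1) 3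
                                    else PySem.Int.floordiv (2 * x - 1) 3 with hf
      rw [List.replicate_succ, List.cons_append]
      simp only [pvA_go]
      rw [hhead, if_neg (by decide : ¬ ((some 'A' : Option Char) = some 'K')), ih]
      have e2 : pvB_run f (k + 1 + 1) m
          = ((pvB_run f (k + 1) (f m)).1, f m :: (pvB_run f (k + 1) (f m)).2) := rfl
      have efm : f m = PySem.Int.floordiv (4 * m - 1) 3 := by simp [hf]
      rw [e2]
      by_cases hk : rest.head? = some 'K'
      · simp [hk, efm, List.append_assoc]
        rw [List.dropLast_cons_of_ne_nil (hne f _)]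
      · simp [hk, efm, List.append_assoc]
    · -- c = 'C'
      subst h1
      set f : Int → Int := fun x => if 'C' = 'A' then PySem.Int.floordiv (4 * x - 1) 3
                                    else PySem.Int.floordiv (2 * x - 1) 3 with hf
      rw [List.replicate_succ, List.cons_append]
      simp only [pvA_go, if_neg (by decide : ¬ (('C' : Char) = 'A'))]
      rw [hhead, if_neg (by decide : ¬ ((some 'C' : Option Char) = some 'K')), ih]
      have e2 : pvB_run f (k + 1 + 1) m
          = ((pvB_run f (k + 1) (f m)).1, f m :: (pvB_run f (k + 1) (f m)).2) := rfl
      have efm : f m = PySem.Int.floordiv (2 * m - 1) 3 := by simp [hf]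
      rw [e2]
      by_cases hk : rest.head? = some 'K'
      · simp [hk, efm, List.append_assoc]
        rw [List.dropLast_cons_of_ne_nil (hne f _)]
      · simp [hk, efm, List.append_assoc]

-- a run-length block of the input list
lemma pvTakeWhile_eq_replicate (c : Char) (rest : List Char) :
    rest.takeWhile (· = c) = List.replicate (rest.takeWhile (· = c)).length c := by
  apply List.eq_replicate_of_mem
  intro b hb
  have := List.mem_takeWhile_imp hb
  simpa using this

lemma pvHead_dropWhile (c : Char) (rest : List Char) :
    (rest.dropWhile (· = c)).head? ≠ some c := by
  intro h
  have := List.head?_dropWhile_not (p := (· = c)) rest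
  rw [h] at this
  simp at this

-- the first run char of pvRle is the head char
lemma pvRle_head (cs : List Char) : (pvRle cs).head?.map Prod.fst = cs.head? := by
  cases cs with
  | nil => simp [pvRle]
  | cons c rest => simp [pvRle]

-- main bridge: A's scan = B's run loop
lemma pvA_eq_pvB (cs : List Char) (m : Int) (chain : List Int)
    (hv : ∀ c ∈ cs, c = 'A' ∨ c = 'C' ∨ c = 'K') :
    pvA_go cs m chain = chain ++ pvB_go (pvRle cs) m := by
  induction hn : cs.length using Nat.strong_induction_on generalizing cs m chain with
  | _ n ih =>
  cases cs with
  | nil => simp [pvA_go, pvRle, pvB_go]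
  | cons c rest =>
    have hc := hv c (by simp)
    set k := (rest.takeWhile (· = c)).length with hk
    set rest' := rest.dropWhile (· = c) with hr
    have hsplit : c :: rest = List.replicate (k + 1) c ++ rest' := by
      rw [List.replicate_succ, List.cons_append]
      congr 1
      conv_lhs => rw [← List.takeWhile_append_dropWhile (p := (· = c)) (l := rest)]
      rw [← hr]; congr 1
      rw [hk]; exact pvTakeWhile_eq_replicate c rest
    have hlen : rest'.length < n := by
      rw [← hn]
      exact Nat.lt_succ_of_le (rest.length_dropWhile_le _)
    have hv' : ∀ d ∈ rest', d = 'A' ∨ d = 'C' ∨ d = 'K' := by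
      intro d hd
      exact hv d (by simp [hsplit]; right; exact hd)
    have hhead : rest'.head? ≠ some c := pvHead_dropWhile c rest
    have hrle : pvRle (c :: rest) = (c, k + 1) :: pvRle rest' := by
      rw [pvRle]
    rcases hc with h1 | h1 | h1
    · -- A-run
      subst h1
      rw [hsplit, pvA_go_ACrun _ (Or.inl rfl) _ _ _ _ hhead,
        ih _ hlen _ _ _ hv' rfl, ← hsplit, hrle]
      simp only [pvB_go, if_neg (by decide : ¬ ('A' = 'K'))]
      rw [pvRle_head, List.append_assoc]
    · -- C-run
      subst h1
      rw [hsplit, pvA_go_ACrun _ (Or.inr rfl) _ _ _ _ hhead,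
        ih _ hlen _ _ _ hv' rfl, ← hsplit, hrle]
      simp only [pvB_go, if_neg (by decide : ¬ ('C' = 'K'))]
      rw [pvRle_head, List.append_assoc]
    · -- K-run
      subst h1
      have hK : rest'.head? ≠ some 'K' := hhead
      rw [hsplit, pvA_go_Krun _ _ _ _ hK, ih _ hlen _ _ _ hv' rfl, ← hsplit, hrle]
      simp only [pvB_go]
      rw [← pvClosedK (k + 1) m, List.append_assoc]
      rfl

lemma pvRle_valid (cs : List Char) (hv : ∀ c ∈ cs, c = 'A' ∨ c = 'C' ∨ c = 'K') :
    (pvRle cs).all (fun p => p.1 = 'A' || p.1 = 'C' || p.1 = 'K') = true := by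
  induction hn : cs.length using Nat.strong_induction_on generalizing cs with
  | _ n ih =>
  cases cs with
  | nil => simp [pvRle]
  | cons c rest =>
    rw [pvRle]
    have hlen : (rest.dropWhile (· = c)).length < n := by
      rw [← hn]
      exact Nat.lt_succ_of_le (rest.length_dropWhile_le _)
    have hv' : ∀ d ∈ rest.dropWhile (· = c), d = 'A' ∨ d = 'C' ∨ d = 'K' := by
      intro d hd
      exact hv d (by simp; right; exact (List.dropWhile_sublist _).subset hd)
    have hc := hv c (by simp)
    simp only [List.all_cons, Bool.and_eq_true]
    refine ⟨by rcases hc with h | h | h <;> simp [h], ih _ hlen _ hv' rfl⟩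

-- ===== VERDICT (by name: the statement is the Claim_ definition above) =====
theorem accelerated_predecessor_chain_from_code_spec : Claim_equal_accelerated_predecessor_chain_from_code := by
  intro code _ hpre
  have hv : ∀ c ∈ code.toList, c = 'A' ∨ c = 'C' ∨ c = 'K' := by
    intro c hc
    have := List.all_eq_true.mp hpre c hc
    simp at this
    tauto
  unfold Spec_accelerated_predecessor_chain_from_code accelerated_predecessor_chain_from_code accelerated_predecessor_chain_from_code_alt
  rw [pvA_eq_pvB _ _ _ hv]
  simp [pvRle_valid _ hv]
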